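-- pv_equiv track=rewrite | github.com/MdAbedin/binarysearch | 0982 Recursive Voting.py | solve
-- ===== SOURCE A (Python) =====
-- def solve(votes):
--     votesd = dict()
--
--     for i in range(len(votes)):
--       if votes[i] < 0: votesd[i] = 0
--       elif votes[i] >= len(votes): votesd[i] = 1
--       elif i not in votesd:
--         ppl = [i]
--         while 0<=votes[ppl[-1]]<len(votes) and ppl[-1] not in votesd:
--           ppl.append(votes[ppl[-1]])
--         if votes[ppl[-1]] < 0: votesd[ppl[-1]] = 0
--         elif votes[ppl[-1]] >= len(votes): votesd[ppl[-1]] = 1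
--         for p in  ppl:
--           votesd[p] = votesd[ppl[-1]]
--
--     return sum(v == 0 for v in votesd.values())
-- ===== SOURCE B (Python) =====
-- def solve(votes):
--     # Direct bounded walk per index: no memo dict, no path list. A chain longer
--     # than n steps must contain a cycle, so n steps always suffice to reach the
--     # terminal whenever the chain terminates at all.
--     n = len(votes)
--     count = 0
--     for i in range(n):
--         j = i
--         steps = 0
--         while steps < n and 0 <= votes[j] < n:
--             j = votes[j]
--             steps += 1
--         if votes[j] < 0:
--             count += 1
--     return count
-- ===== Notes on version B (the rewrite author's own statement) =====
-- stated objective: simpler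
-- what changed: Replaces the memoised dict + path-compression traversal with a direct bounded chain walk per index (no dict, no path list): each index follows its vote chain for at most n in-range steps and is counted iff the chain exits with a negative vote.
import Mathlib
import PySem

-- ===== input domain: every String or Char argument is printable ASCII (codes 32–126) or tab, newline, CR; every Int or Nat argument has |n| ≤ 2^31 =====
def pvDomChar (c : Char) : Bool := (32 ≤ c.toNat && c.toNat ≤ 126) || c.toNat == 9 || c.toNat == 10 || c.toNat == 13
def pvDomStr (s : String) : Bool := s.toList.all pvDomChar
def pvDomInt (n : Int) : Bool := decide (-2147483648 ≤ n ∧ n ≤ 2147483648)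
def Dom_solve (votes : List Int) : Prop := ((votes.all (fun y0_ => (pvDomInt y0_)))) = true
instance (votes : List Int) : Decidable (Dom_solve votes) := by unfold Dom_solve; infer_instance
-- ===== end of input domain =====

-- B replaces A's memoised dict/path-compression traversal by a direct bounded chain walk
-- per index (simpler, no dict); equivalence is claimed on Pre_solve, exactly the inputs
-- where A's while loop terminates.

-- votes[j]: every index either port reads is in [0, len votes), where getD j 0 is exact.
def pvGet (votes : List Int) (j : ℕ) : Int := votes.getD j 0

-- ===== PORT A =====
-- the inner 'while' loop; d is not modified inside it.  Fuel votes.length + 1 is enough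
-- for every input in Pre_solve (where the Python loop terminates); fuel 0 is unreachable there.
def solveChain (votes : List Int) (d : PySem.Dict ℕ Int) : ℕ → List ℕ → ℕ → List ℕ × ℕ
  | 0, ppl, last => (ppl, last)
  | fuel+1, ppl, last =>
      let v := pvGet votes last
      if 0 ≤ v ∧ v < (votes.length : Int) ∧ d.contains last = false then
        solveChain votes d fuel (ppl ++ [v.toNat]) v.toNat
      else (ppl, last)

-- the outer 'for i in range(len(votes))' loop
def solveLoop (votes : List Int) : List ℕ → PySem.Dict ℕ Int → PySem.Dict ℕ Int
  | [], d => d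
  | i :: rest, d =>
      let vi := pvGet votes i
      let d' :=
        if vi < 0 then d.insert i 0
        else if (votes.length : Int) ≤ vi then d.insert i 1
        else if d.contains i = false then
          let pl := solveChain votes d (votes.length + 1) [i] i
          let vl := pvGet votes pl.2
          let d1 := if vl < 0 then d.insert pl.2 0
                    else if (votes.length : Int) ≤ vl then d.insert pl.2 1
                    else d
          -- votesd[ppl[-1]]: the key is always present at this point in the Python
          let c := d1.getD pl.2 0
          pl.1.foldl (fun dd p => dd.insert p c) d1
        else d
      solveLoop votes rest d'

def solve (votes : List Int) : Int :=
  let d := solveLoop votes (List.range votes.length) PySem.Dict.empty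
  d.values.foldl (fun acc v => if v = 0 then acc + 1 else acc) 0

-- ===== PORT B =====
-- B's inner while loop; fuel = n - steps
def bWalk (votes : List Int) : ℕ → ℕ → ℕ
  | 0, j => j
  | fuel+1, j =>
      let v := pvGet votes j
      if 0 ≤ v ∧ v < (votes.length : Int) then bWalk votes fuel v.toNat else j

def solve_alt (votes : List Int) : Int :=
  (List.range votes.length).foldl
    (fun cnt i => if pvGet votes (bWalk votes votes.length i) < 0 then cnt + 1 else cnt) 0

-- ===== PRECONDITION & SPEC =====
-- one step of the vote chain, with votes.length as an absorbing "escaped" sentinel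
def pvStep (votes : List Int) (i : ℕ) : ℕ :=
  if i < votes.length then
    (if 0 ≤ pvGet votes i ∧ pvGet votes i < (votes.length : Int) then (pvGet votes i).toNat
     else votes.length)
  else votes.length

-- Pre_solve = exactly the inputs on which the Python A returns: every vote chain leaves
-- [0, n) within n steps; on any input with a reachable cycle A's while loop runs forever.
def Pre_solve (votes : List Int) : Prop :=
  ∀ i, i < votes.length → (pvStep votes)^[votes.length] i = votes.length
instance (votes : List Int) : Decidable (Pre_solve votes) := by unfold Pre_solve; infer_instance

def pvWitness_solve : List Int := [1, 2, -1]

def Spec_solve (votes : List Int) (out : Int) : Prop := out = solve_alt votes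
instance (votes : List Int) (out : Int) : Decidable (Spec_solve votes out) := by unfold Spec_solve; infer_instance

-- ===== CLAIM (what is proved, stated in full; the proofs are below) =====
def Claim_equal_solve : Prop := ∀ (votes : List Int), Dom_solve votes → Pre_solve votes → Spec_solve votes (solve votes)

-- ===== LEMMAS AND PROOFS =====

-- the class of an index: follow the chain with the given fuel; 0 = resolves negative
def pvCls (votes : List Int) : ℕ → ℕ → Int
  | 0, _ => 1
  | f+1, i =>
      let v := pvGet votes i
      if v < 0 then 0 else if (votes.length : Int) ≤ v then 1 else pvCls votes f v.toNat

def pvC (votes : List Int) (i : ℕ) : Int := pvCls votes (votes.length + 1) i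

theorem pvStep_succ_in (votes : List Int) (i : ℕ) (f : ℕ) (hi : i < votes.length)
    (hv : 0 ≤ pvGet votes i ∧ pvGet votes i < (votes.length : Int))
    (h : (pvStep votes)^[f+1] i = votes.length) :
    (pvStep votes)^[f] (pvGet votes i).toNat = votes.length := by
  rw [Function.iterate_succ_apply] at h
  have hs : pvStep votes i = (pvGet votes i).toNat := by
    unfold pvStep; rw [if_pos hi, if_pos hv]
  rwa [hs] at h

theorem pvToNat_lt (votes : List Int) (i : ℕ)
    (hv : 0 ≤ pvGet votes i ∧ pvGet votes i < (votes.length : Int)) :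
    (pvGet votes i).toNat < votes.length := by omega

theorem pvCls_stable (votes : List Int) :
    ∀ f i g, i < votes.length → (pvStep votes)^[f] i = votes.length →
      pvCls votes (f + 1 + g) i = pvCls votes (f + 1) i := by
  intro f
  induction f with
  | zero =>
    intro i g hi h
    simp only [Function.iterate_zero, id_eq] at h; omega
  | succ f ih =>
    intro i g hi h
    have harr : f + 1 + 1 + g = f + 1 + g + 1 := by omega
    rw [harr]
    simp only [pvCls]
    by_cases h1 : pvGet votes i < 0
    · simp [h1]
    · by_cases h2 : (votes.length : Int) ≤ pvGet votes i
      · simp [h1, h2]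
      · have hv : 0 ≤ pvGet votes i ∧ pvGet votes i < (votes.length : Int) := by omega
        simp only [if_neg h1, if_neg h2]
        exact ih (pvGet votes i).toNat g (pvToNat_lt votes i hv) (pvStep_succ_in votes i f hi hv h)

theorem pvC_neg (votes : List Int) (i : ℕ) (h : pvGet votes i < 0) : pvC votes i = 0 := by
  simp [pvC, pvCls, h]

theorem pvC_big (votes : List Int) (i : ℕ) (h : (votes.length : Int) ≤ pvGet votes i) :
    pvC votes i = 1 := by
  have h1 : ¬ pvGet votes i < 0 := by omega
  simp [pvC, pvCls, h1, h]

theorem pvC_chain (votes : List Int) (i : ℕ) (hi : i < votes.length)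
    (hesc : (pvStep votes)^[votes.length] i = votes.length)
    (hv : 0 ≤ pvGet votes i ∧ pvGet votes i < (votes.length : Int)) :
    pvC votes i = pvC votes (pvGet votes i).toNat := by
  obtain ⟨m, hm⟩ : ∃ m, votes.length = m + 1 := ⟨votes.length - 1, by omega⟩
  have h1 : ¬ pvGet votes i < 0 := by omega
  have h2 : ¬ (votes.length : Int) ≤ pvGet votes i := by omega
  have hesc' : (pvStep votes)^[m] (pvGet votes i).toNat = votes.length := by
    have := pvStep_succ_in votes i m hi hv (by rw [← hm] at *; exact hesc)
    exact this
  have hlt := pvToNat_lt votes i hv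
  have hstep : pvC votes i = pvCls votes votes.length (pvGet votes i).toNat := by
    show pvCls votes (votes.length + 1) i = _
    simp only [pvCls, if_neg h1, if_neg h2]
  have hstable1 := pvCls_stable votes m (pvGet votes i).toNat 0 hlt hesc'
  have hstable2 := pvCls_stable votes m (pvGet votes i).toNat 1 hlt hesc'
  rw [hstep]
  show _ = pvCls votes (votes.length + 1) (pvGet votes i).toNat
  rw [show votes.length = m + 1 from hm, show m + 1 + 1 = m + 1 + 0 + 1 from by omega] at *
  rw [hstable2, ← hstable1]


-- B's walk computes the class
theorem bWalk_class (votes : List Int)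
    (hesc : ∀ j, j < votes.length → (pvStep votes)^[votes.length] j = votes.length) :
    ∀ fuel f i, i < votes.length → (pvStep votes)^[f+1] i = votes.length → f < fuel →
      (if pvGet votes (bWalk votes fuel i) < 0 then (0:Int) else 1) = pvC votes i := by
  intro fuel
  induction fuel with
  | zero => intro f i _ _ hlt; omega
  | succ fuel ih =>
    intro f i hi hf hlt
    by_cases hv : 0 ≤ pvGet votes i ∧ pvGet votes i < (votes.length : Int)
    · have hrec : bWalk votes (fuel + 1) i = bWalk votes fuel (pvGet votes i).toNat := by
        simp only [bWalk, if_pos hv]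
      rw [hrec, pvC_chain votes i hi (hesc i hi) hv]
      obtain ⟨f', rfl⟩ : ∃ f', f = f' + 1 := by
        rcases Nat.eq_zero_or_pos f with h0 | h0
        · exfalso
          subst h0
          have := pvStep_succ_in votes i 0 hi hv hf
          simp only [Function.iterate_zero, id_eq] at this
          have := pvToNat_lt votes i hv; omega
        · exact ⟨f - 1, by omega⟩
      exact ih f' (pvGet votes i).toNat (pvToNat_lt votes i hv)
        (pvStep_succ_in votes i (f' + 1) hi hv hf) (by omega)
    · have hrec : bWalk votes (fuel + 1) i = i := by
        simp only [bWalk, if_neg hv]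
      rw [hrec]
      by_cases hneg : pvGet votes i < 0
      · rw [if_pos hneg, pvC_neg votes i hneg]
      · have hbig : (votes.length : Int) ≤ pvGet votes i := by omega
        rw [if_neg hneg, pvC_big votes i hbig]

def pvGood (votes : List Int) (d : PySem.Dict ℕ Int) : Prop :=
  (∀ k v, d.get? k = some v → k < votes.length ∧ v = pvC votes k) ∧ d.keys.Nodup

theorem solveChain_spec (votes : List Int) (d : PySem.Dict ℕ Int)
    (hesc : ∀ j, j < votes.length → (pvStep votes)^[votes.length] j = votes.length) :
    ∀ fuel f ppl last, last < votes.length →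
      (pvStep votes)^[f+1] last = votes.length → f < fuel →
      (∀ p ∈ ppl, p < votes.length ∧ pvC votes p = pvC votes last) →
      (solveChain votes d fuel ppl last).2 < votes.length ∧
      (∀ p ∈ ppl, p ∈ (solveChain votes d fuel ppl last).1) ∧
      (∀ p ∈ (solveChain votes d fuel ppl last).1,
          p < votes.length ∧ pvC votes p = pvC votes (solveChain votes d fuel ppl last).2) ∧
      (pvGet votes (solveChain votes d fuel ppl last).2 < 0 ∨
       (votes.length : Int) ≤ pvGet votes (solveChain votes d fuel ppl last).2 ∨
       d.contains (solveChain votes d fuel ppl last).2 = true) := by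
  intro fuel
  induction fuel with
  | zero => intro f ppl last _ _ hlt; omega
  | succ fuel ih =>
    intro f ppl last hl hf hlt hppl
    by_cases hg : 0 ≤ pvGet votes last ∧ pvGet votes last < (votes.length : Int) ∧
        d.contains last = false
    · have hv : 0 ≤ pvGet votes last ∧ pvGet votes last < (votes.length : Int) := ⟨hg.1, hg.2.1⟩
      have hrec : solveChain votes d (fuel + 1) ppl last =
          solveChain votes d fuel (ppl ++ [(pvGet votes last).toNat]) (pvGet votes last).toNat := by
        simp only [solveChain, if_pos hg]
      rw [hrec]
      obtain ⟨f', rfl⟩ : ∃ f', f = f' + 1 := by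
        rcases Nat.eq_zero_or_pos f with h0 | h0
        · exfalso
          subst h0
          have := pvStep_succ_in votes last 0 hl hv hf
          simp only [Function.iterate_zero, id_eq] at this
          have := pvToNat_lt votes last hv; omega
        · exact ⟨f - 1, by omega⟩
      have hchain := pvC_chain votes last hl (hesc last hl) hv
      have hnext := ih f' (ppl ++ [(pvGet votes last).toNat]) (pvGet votes last).toNat
        (pvToNat_lt votes last hv) (pvStep_succ_in votes last (f' + 1) hl hv hf) (by omega)
        (by
          intro p hp
          rcases List.mem_append.mp hp with hp | hp
          · obtain ⟨h1, h2⟩ := hppl p hp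
            exact ⟨h1, by rw [h2, hchain]⟩
          · simp only [List.mem_singleton] at hp
            subst hp
            exact ⟨pvToNat_lt votes last hv, rfl⟩)
      refine ⟨hnext.1, ?_, hnext.2.2.1, hnext.2.2.2⟩
      intro p hp
      exact hnext.2.1 p (List.mem_append.mpr (Or.inl hp))
    · have hrec : solveChain votes d (fuel + 1) ppl last = (ppl, last) := by
        simp only [solveChain, if_neg hg]
      rw [hrec]
      refine ⟨hl, fun p hp => hp, hppl, ?_⟩
      by_cases h1 : pvGet votes last < 0
      · exact Or.inl h1
      · by_cases h2 : (votes.length : Int) ≤ pvGet votes last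
        · exact Or.inr (Or.inl h2)
        · refine Or.inr (Or.inr ?_)
          rcases Bool.eq_false_or_eq_true (d.contains last) with hc | hc
          · exact hc
          · exact absurd ⟨by omega, by omega, hc⟩ hg

theorem foldl_insert_good (votes : List Int) (c : Int) :
    ∀ (l : List ℕ) (d : PySem.Dict ℕ Int), pvGood votes d →
      (∀ p ∈ l, p < votes.length ∧ pvC votes p = c) →
      pvGood votes (l.foldl (fun dd p => dd.insert p c) d) ∧
      (∀ k, d.contains k = true → (l.foldl (fun dd p => dd.insert p c) d).contains k = true) ∧
      (∀ p ∈ l, (l.foldl (fun dd p => dd.insert p c) d).contains p = true) := by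
  intro l
  induction l with
  | nil => exact fun d hg _ => ⟨hg, fun k hk => hk, by simp⟩
  | cons p l ih =>
    intro d hg hl
    obtain ⟨hp, hpc⟩ := hl p List.mem_cons_self
    have hg' : pvGood votes (d.insert p c) := by
      constructor
      · intro k v hk
        rw [PySem.Dict.get?_insert] at hk
        by_cases hkp : k = p
        · rw [if_pos hkp] at hk
          subst hkp
          exact ⟨hp, by injection hk with h; omega⟩
        · rw [if_neg hkp] at hk
          exact hg.1 k v hk
      · exact PySem.Dict.nodup_keys_insert d p c hg.2
    have step := ih (d.insert p c) hg' (fun q hq => hl q (List.mem_cons_of_mem p hq))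
    refine ⟨step.1, ?_, ?_⟩
    · intro k hk
      exact step.2.1 k (by rw [PySem.Dict.contains_insert]; simp [hk])
    · intro q hq
      rcases List.mem_cons.mp hq with rfl | hq
      · exact step.2.1 q (by rw [PySem.Dict.contains_insert]; simp)
      · exact step.2.2 q hq

theorem pvGood_insert (votes : List Int) (d : PySem.Dict ℕ Int) (k : ℕ) (v : Int)
    (hg : pvGood votes d) (hk : k < votes.length) (hv : v = pvC votes k) :
    pvGood votes (d.insert k v) := by
  constructor
  · intro k' v' h
    rw [PySem.Dict.get?_insert] at h
    by_cases hkk : k' = k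
    · rw [if_pos hkk] at h
      subst hkk
      exact ⟨hk, by injection h with h'; omega⟩
    · rw [if_neg hkk] at h
      exact hg.1 k' v' h
  · exact PySem.Dict.nodup_keys_insert d k v hg.2

theorem solveLoop_inv (votes : List Int) (hpre : Pre_solve votes) :
    ∀ (is : List ℕ) (d : PySem.Dict ℕ Int), (∀ i ∈ is, i < votes.length) → pvGood votes d →
      pvGood votes (solveLoop votes is d) ∧
      (∀ k, d.contains k = true → (solveLoop votes is d).contains k = true) ∧
      (∀ i ∈ is, (solveLoop votes is d).contains i = true) := by
  intro is
  induction is with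
  | nil => exact fun d _ hg => ⟨hg, fun k hk => hk, by simp⟩
  | cons i rest ih =>
    intro d hmem hg
    have hi : i < votes.length := hmem i List.mem_cons_self
    have hrest : ∀ j ∈ rest, j < votes.length := fun j hj => hmem j (List.mem_cons_of_mem i hj)
    have key : ∃ d', solveLoop votes (i :: rest) d = solveLoop votes rest d' ∧
        pvGood votes d' ∧ (∀ k, d.contains k = true → d'.contains k = true) ∧
        d'.contains i = true := by
      by_cases h1 : pvGet votes i < 0
      · refine ⟨d.insert i 0, by simp only [solveLoop, if_pos h1], ?_, ?_, ?_⟩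
        · exact pvGood_insert votes d i 0 hg hi (pvC_neg votes i h1).symm
        · intro k hk; rw [PySem.Dict.contains_insert]; simp [hk]
        · rw [PySem.Dict.contains_insert]; simp
      · by_cases h2 : (votes.length : Int) ≤ pvGet votes i
        · refine ⟨d.insert i 1, by simp only [solveLoop, if_neg h1, if_pos h2], ?_, ?_, ?_⟩
          · exact pvGood_insert votes d i 1 hg hi (pvC_big votes i h2).symm
          · intro k hk; rw [PySem.Dict.contains_insert]; simp [hk]
          · rw [PySem.Dict.contains_insert]; simp
        · by_cases h3 : d.contains i = false
          · -- the chain branch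
            have hv : 0 ≤ pvGet votes i ∧ pvGet votes i < (votes.length : Int) := by omega
            obtain ⟨m, hm⟩ : ∃ m, votes.length = m + 1 := ⟨votes.length - 1, by omega⟩
            have hchain := solveChain_spec votes d hpre (votes.length + 1) m [i] i hi
              (by rw [← hm]; exact hpre i hi) (by omega)
              (by intro p hp; simp only [List.mem_singleton] at hp; subst hp; exact ⟨hi, rfl⟩)
            obtain ⟨hl2, hsub, hprops, hexit⟩ := hchain
            have hiin : i ∈ (solveChain votes d (votes.length + 1) [i] i).1 :=
              hsub i (List.mem_singleton.mpr rfl)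
            -- the value written: d1.getD pl.2 0 = pvC pl.2, and pvGood d1, in all three shapes of d1
            have hd1 : ∀ d1 : PySem.Dict ℕ Int, pvGood votes d1 →
                d1.getD (solveChain votes d (votes.length + 1) [i] i).2 0 =
                  pvC votes (solveChain votes d (votes.length + 1) [i] i).2 →
                pvGood votes ((solveChain votes d (votes.length + 1) [i] i).1.foldl
                    (fun dd p => dd.insert p
                      (d1.getD (solveChain votes d (votes.length + 1) [i] i).2 0)) d1) ∧
                (∀ k, d1.contains k = true →
                  ((solveChain votes d (votes.length + 1) [i] i).1.foldl
                    (fun dd p => dd.insert p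
                      (d1.getD (solveChain votes d (votes.length + 1) [i] i).2 0)) d1).contains k = true) ∧
                ((solveChain votes d (votes.length + 1) [i] i).1.foldl
                    (fun dd p => dd.insert p
                      (d1.getD (solveChain votes d (votes.length + 1) [i] i).2 0)) d1).contains i = true := by
              intro d1 hg1 hc
              have hf := foldl_insert_good votes
                (d1.getD (solveChain votes d (votes.length + 1) [i] i).2 0)
                (solveChain votes d (votes.length + 1) [i] i).1 d1 hg1
                (by intro p hp; obtain ⟨ha, hb⟩ := hprops p hp; exact ⟨ha, by rw [hb, hc]⟩)
              exact ⟨hf.1, hf.2.1, hf.2.2 i hiin⟩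
            by_cases hv1 : pvGet votes (solveChain votes d (votes.length + 1) [i] i).2 < 0
            · refine ⟨_, by simp only [solveLoop, if_neg h1, if_neg h2, if_pos h3, if_pos hv1]; rfl, ?_⟩
              have hgd1 := pvGood_insert votes d _ 0 hg hl2
                (pvC_neg votes _ hv1).symm
              have hres := hd1 (d.insert (solveChain votes d (votes.length + 1) [i] i).2 0) hgd1
                (by rw [PySem.Dict.getD_insert_self, pvC_neg votes _ hv1])
              refine ⟨hres.1, ?_, hres.2.2⟩
              intro k hk
              exact hres.2.1 k (by rw [PySem.Dict.contains_insert]; simp [hk])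
            · by_cases hv2 : (votes.length : Int) ≤
                  pvGet votes (solveChain votes d (votes.length + 1) [i] i).2
              · refine ⟨_, by simp only [solveLoop, if_neg h1, if_neg h2, if_pos h3, if_neg hv1,
                  if_pos hv2]; rfl, ?_⟩
                have hgd1 := pvGood_insert votes d _ 1 hg hl2
                  (pvC_big votes _ hv2).symm
                have hres := hd1 (d.insert (solveChain votes d (votes.length + 1) [i] i).2 1) hgd1
                  (by rw [PySem.Dict.getD_insert_self, pvC_big votes _ hv2])
                refine ⟨hres.1, ?_, hres.2.2⟩
                intro k hk
                exact hres.2.1 k (by rw [PySem.Dict.contains_insert]; simp [hk])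
              · -- the chain ended on a memoised index: d1 = d and the key is present
                have hcon : d.contains (solveChain votes d (votes.length + 1) [i] i).2 = true := by
                  rcases hexit with h | h | h
                  · omega
                  · omega
                  · exact h
                refine ⟨_, by simp only [solveLoop, if_neg h1, if_neg h2, if_pos h3, if_neg hv1,
                  if_neg hv2]; rfl, ?_⟩
                have hsome : ∃ w, d.get? (solveChain votes d (votes.length + 1) [i] i).2 = some w := by
                  rcases ho : d.get? (solveChain votes d (votes.length + 1) [i] i).2 with _ | w
                  · rw [PySem.Dict.get?_eq_none_iff_contains] at ho
                    rw [hcon] at ho; exact absurd ho (by simp)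
                  · exact ⟨w, rfl⟩
                obtain ⟨w, hw⟩ := hsome
                have hres := hd1 d hg
                  (by rw [PySem.Dict.getD_eq_get?_getD, hw]; simp [(hg.1 _ w hw).2])
                exact ⟨hres.1, hres.2.1, hres.2.2⟩
          · have h3' : d.contains i = true := by
              rcases Bool.eq_false_or_eq_true (d.contains i) with hc | hc
              · exact hc
              · exact absurd hc h3
            exact ⟨d, by simp only [solveLoop, if_neg h1, if_neg h2, if_neg h3], hg,
              fun k hk => hk, h3'⟩
    obtain ⟨d', he, hg', hmono, hci⟩ := key
    rw [he]
    have step := ih d' hrest hg'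
    refine ⟨step.1, fun k hk => step.2.1 k (hmono k hk), ?_⟩
    intro j hj
    rcases List.mem_cons.mp hj with rfl | hj
    · exact step.2.1 j hci
    · exact step.2.2 j hj

-- ===== VERDICT (by name: the statement is the Claim_ definition above) =====
theorem solve_spec : Claim_equal_solve := by
  unfold Claim_equal_solve
  intro votes _ hpre
  unfold Spec_solve
  have hinv := solveLoop_inv votes hpre (List.range votes.length) PySem.Dict.empty
    (fun i hi => List.mem_range.mp hi)
    ⟨by intro k v h; rw [PySem.Dict.get?_empty] at h; exact absurd h (by simp),
     PySem.Dict.nodup_keys_empty⟩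
  obtain ⟨hgood, -, hcov⟩ := hinv
  set D := solveLoop votes (List.range votes.length) PySem.Dict.empty with hD
  have hnd : D.keys.Nodup := hgood.2
  have hmemkeys : ∀ k, k ∈ D.keys ↔ k ∈ List.range votes.length := by
    intro k
    constructor
    · intro hk
      have hc := (PySem.Dict.contains_iff_mem_keys D k).mpr hk
      rcases ho : D.get? k with _ | w
      · rw [PySem.Dict.get?_eq_none_iff_contains, hc] at ho
        exact absurd ho (by simp)
      · exact List.mem_range.mpr (hgood.1 k w ho).1
    · intro hk
      exact (PySem.Dict.contains_iff_mem_keys D k).mp (hcov k hk)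
  have hperm : D.keys.Perm (List.range votes.length) :=
    (List.perm_ext_iff_of_nodup hnd (List.nodup_range)).mpr hmemkeys
  have hgetD : ∀ k ∈ D.keys, D.getD k 0 = pvC votes k := by
    intro k hk
    have hc := (PySem.Dict.contains_iff_mem_keys D k).mpr hk
    rcases ho : D.get? k with _ | w
    · rw [PySem.Dict.get?_eq_none_iff_contains, hc] at ho
      exact absurd ho (by simp)
    · rw [PySem.Dict.getD_eq_get?_getD, ho]
      exact (hgood.1 k w ho).2
  show D.values.foldl (fun acc v => if v = 0 then acc + 1 else acc) 0 = solve_alt votes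
  rw [PySem.List.foldl_ite_add_one (fun v => v = 0) D.values 0]
  unfold solve_alt
  rw [PySem.List.foldl_ite_add_one
    (fun i => pvGet votes (bWalk votes votes.length i) < 0) (List.range votes.length) 0]
  rw [PySem.Dict.values_eq_map_keys D hnd 0, List.countP_map]
  have hA : List.countP ((fun v => decide (v = 0)) ∘ fun k => D.getD k 0) D.keys =
      List.countP (fun k => decide (pvC votes k = 0)) D.keys :=
    List.countP_congr (by
      intro k hk
      simp only [Function.comp_apply, decide_eq_true_eq]
      rw [hgetD k hk])
  have hB : List.countP (fun i => decide (pvGet votes (bWalk votes votes.length i) < 0))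
      (List.range votes.length) =
      List.countP (fun k => decide (pvC votes k = 0)) (List.range votes.length) :=
    List.countP_congr (by
      intro i hi
      have hi' := List.mem_range.mp hi
      obtain ⟨m, hm⟩ : ∃ m, votes.length = m + 1 := ⟨votes.length - 1, by omega⟩
      have hw := bWalk_class votes hpre votes.length m i hi'
        (by rw [← hm]; exact hpre i hi') (by omega)
      simp only [decide_eq_true_eq]
      constructor
      · intro hneg
        rw [if_pos hneg] at hw
        omega
      · intro hc
        by_contra hneg
        rw [if_neg hneg] at hw
        omega)
  rw [hA, hB, hperm.countP_eq]
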